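-- pv_equiv track=rewrite | github.com/LuckyZ10/project-starlight | starlight/core/dag.py | all_reachable
-- ===== SOURCE A (Python) =====
-- def all_reachable(start: str, edges: dict[str, list[str]], total_nodes: int) -> bool:
--     """检查从 start 是否能到达所有节点"""
--     visited = set()
--
--     def dfs(node):
--         visited.add(node)
--         for neighbor in edges.get(node, []):
--             if neighbor not in visited:
--                 dfs(neighbor)
--
--     dfs(start)
--     return len(visited) == total_nodes
-- ===== SOURCE B (Python) =====
-- def all_reachable(start: str, edges: dict[str, list[str]], total_nodes: int) -> bool:
--     """Iterative worklist version: explicit stack instead of recursion."""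
--     visited = set()
--     stack = [start]
--     while stack:
--         node = stack.pop()
--         if node in visited:
--             continue
--         visited.add(node)
--         for nb in edges.get(node, []):
--             if nb not in visited:
--                 stack.append(nb)
--     return len(visited) == total_nodes
-- ===== Notes on version B (the rewrite author's own statement) =====
-- stated objective: alternative
-- what changed: Recursive DFS with a nested closure is replaced by an iterative explicit-stack worklist loop that pops nodes, marks them visited and pushes unvisited neighbours; only the size of the visited set matters, so traversal order is irrelevant.
import Mathlib
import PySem

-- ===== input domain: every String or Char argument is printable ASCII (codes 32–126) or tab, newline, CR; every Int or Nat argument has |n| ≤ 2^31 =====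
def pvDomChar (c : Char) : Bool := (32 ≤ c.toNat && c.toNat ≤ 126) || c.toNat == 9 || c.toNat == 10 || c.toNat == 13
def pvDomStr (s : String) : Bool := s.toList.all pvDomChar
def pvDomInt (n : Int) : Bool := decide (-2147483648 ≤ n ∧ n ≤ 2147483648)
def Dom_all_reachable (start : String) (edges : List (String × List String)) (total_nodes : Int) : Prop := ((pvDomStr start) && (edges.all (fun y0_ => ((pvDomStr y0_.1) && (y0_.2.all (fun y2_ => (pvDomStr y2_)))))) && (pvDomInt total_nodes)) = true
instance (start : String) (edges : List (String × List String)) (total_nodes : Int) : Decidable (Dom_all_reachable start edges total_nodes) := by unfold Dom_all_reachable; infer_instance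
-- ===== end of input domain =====

-- B replaces A's recursive DFS closure by an iterative explicit-stack worklist; same return value everywhere.
-- Shared primitive: edges.get(node, []) — first-match association-list lookup (exact for Python dicts).
def pvAdj (edges : List (String × List String)) (node : String) : List String :=
  PySem.Dict.getD (PySem.Dict.mk edges) node []

-- All node names occurring in the input (start, keys, neighbours); used only to bound the fuel of the ports.
def pvNodes (edges : List (String × List String)) (start : String) : List String :=
  start :: edges.flatMap (fun p => p.1 :: p.2)

-- ===== PORT A =====
-- A's recursive dfs; fuel only totalizes the recursion (proved never exhausted at the fuel all_reachable passes).
mutual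
def pvDfsA (edges : List (String × List String)) (fuel : Nat) (node : String)
    (visited : List String) : Option (List String) :=
  match fuel with
  | 0 => none
  | f + 1 => pvDfsList edges f (pvAdj edges node) (PySem.Set.add visited node)
termination_by (fuel, 0)

def pvDfsList (edges : List (String × List String)) (fuel : Nat) (l : List String)
    (vis : List String) : Option (List String) :=
  match l with
  | [] => some vis
  | nb :: rest =>
    if nb ∈ vis then pvDfsList edges fuel rest vis
    else
      match pvDfsA edges fuel nb vis with
      | none => none
      | some vis' => pvDfsList edges fuel rest vis'
termination_by (fuel, l.length + 1)
end

def all_reachable (start : String) (edges : List (String × List String)) (total_nodes : Int) : Bool :=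
  match pvDfsA edges ((pvNodes edges start).length + 1) start [] with
  | some visited => ((visited.length : Int) == total_nodes)
  | none => false

-- ===== PORT B =====
-- B's while-loop; stack head = top (Python list.pop/append act at the end); fuel only totalizes the loop.
def pvLoopB (edges : List (String × List String)) (fuel : Nat) (stack vis : List String) :
    Option (List String) :=
  match fuel, stack with
  | _, [] => some vis
  | 0, _ :: _ => none
  | f + 1, node :: rest =>
    if node ∈ vis then pvLoopB edges f rest vis
    else
      let vis' := PySem.Set.add vis node
      pvLoopB edges f
        ((pvAdj edges node).foldl (fun st nb => if nb ∈ vis' then st else nb :: st) rest) vis'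

def all_reachable_alt (start : String) (edges : List (String × List String)) (total_nodes : Int) : Bool :=
  let K := 1 + (edges.map (fun p => p.2.length)).sum
  match pvLoopB edges (2 + K * (pvNodes edges start).length) [start] [] with
  | some visited => ((visited.length : Int) == total_nodes)
  | none => false

-- ===== PRECONDITION & SPEC =====
def Spec_all_reachable (start : String) (edges : List (String × List String)) (total_nodes : Int) (out : Bool) : Prop := out = all_reachable_alt start edges total_nodes
instance (start : String) (edges : List (String × List String)) (total_nodes : Int) (out : Bool) : Decidable (Spec_all_reachable start edges total_nodes out) := by unfold Spec_all_reachable; infer_instance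

-- ===== CLAIM (what is proved, stated in full; the proofs are below) =====
def Claim_equal_all_reachable : Prop := ∀ (start : String) (edges : List (String × List String)) (total_nodes : Int), Dom_all_reachable start edges total_nodes → Spec_all_reachable start edges total_nodes (all_reachable start edges total_nodes)

-- ===== LEMMAS AND PROOFS =====

/-- Reachability along `pvAdj` edges. -/
inductive PvReach (edges : List (String × List String)) : String → String → Prop
  | refl (a : String) : PvReach edges a a
  | head {a b c : String} : b ∈ pvAdj edges a → PvReach edges b c → PvReach edges a c

theorem pvReach_mem {edges : List (String × List String)} {S : List String}
    (hcl : ∀ x ∈ S, ∀ nb ∈ pvAdj edges x, nb ∈ S) :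
    ∀ {a c : String}, a ∈ S → PvReach edges a c → c ∈ S := by
  intro a c ha h
  induction h with
  | refl => exact ha
  | head hb _ ih => exact ih (hcl _ ha _ hb)

theorem pvAdj_subset {edges : List (String × List String)} {u x : String}
    (h : x ∈ pvAdj edges u) : ∃ p ∈ edges, x ∈ p.2 := by
  unfold pvAdj PySem.Dict.getD PySem.Dict.get? at h
  cases hf : List.find? (fun p => p.1 == u) edges with
  | none => simp [hf] at h
  | some p =>
    refine ⟨p, List.mem_of_find?_eq_some hf, ?_⟩
    simpa [hf] using h

theorem pvAdj_subset_nodes {edges : List (String × List String)} {start u : String} :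
    ∀ x ∈ pvAdj edges u, x ∈ pvNodes edges start := by
  intro x hx
  obtain ⟨p, hp, hxp⟩ := pvAdj_subset hx
  simp only [pvNodes, List.mem_cons, List.mem_flatMap]
  exact Or.inr ⟨p, hp, Or.inr hxp⟩

theorem pvAdj_length {edges : List (String × List String)} (u : String) :
    (pvAdj edges u).length ≤ (edges.map (fun p => p.2.length)).sum := by
  unfold pvAdj PySem.Dict.getD PySem.Dict.get?
  cases hf : List.find? (fun p => p.1 == u) edges with
  | none => simp
  | some p =>
    simp only [Option.map_some, Option.getD_some]
    exact List.single_le_sum (by simp) _ (List.mem_map_of_mem (List.mem_of_find?_eq_some hf))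

theorem set_add_of_not_mem {vis : List String} {node : String} (h : node ∉ vis) :
    PySem.Set.add vis node = vis ++ [node] := by
  simp [PySem.Set.add, PySem.Set.contains, h]

-- invariant packages (used only by the proofs below)
def PL (edges : List (String × List String)) (fuel : Nat) : Prop :=
  ∀ l vis out, pvDfsList edges fuel l vis = some out →
    (∀ x ∈ vis, x ∈ out) ∧ (∀ x ∈ l, x ∈ out) ∧
    (∀ x ∈ out, x ∈ vis ∨ ∃ s ∈ l, PvReach edges s x) ∧
    (∀ x ∈ out, x ∈ vis ∨ ∀ nb ∈ pvAdj edges x, nb ∈ out) ∧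
    (vis.Nodup → out.Nodup)

def PA (edges : List (String × List String)) (fuel : Nat) : Prop :=
  ∀ node vis out, pvDfsA edges fuel node vis = some out →
    (∀ x ∈ vis, x ∈ out) ∧ (node ∈ out) ∧
    (∀ x ∈ out, x ∈ vis ∨ PvReach edges node x) ∧
    (∀ x ∈ out, x ∈ vis ∨ ∀ nb ∈ pvAdj edges x, nb ∈ out) ∧
    (vis.Nodup → out.Nodup)

theorem pl_of_pa {edges : List (String × List String)} {fuel : Nat} (hA : PA edges fuel) :
    PL edges fuel := by
  intro l
  induction l with
  | nil =>
    intro vis out h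
    rw [pvDfsList] at h
    cases h
    exact ⟨fun x hx => hx, by simp, fun x hx => Or.inl hx, fun x hx => Or.inl hx, id⟩
  | cons nb rest ih =>
    intro vis out h
    rw [pvDfsList] at h
    by_cases hnb : nb ∈ vis
    · rw [if_pos hnb] at h
      obtain ⟨h1, h2, h3, h4, h5⟩ := ih vis out h
      refine ⟨h1, ?_, ?_, h4, h5⟩
      · intro x hx
        rcases List.mem_cons.mp hx with hx | hx
        · exact h1 _ (hx ▸ hnb)
        · exact h2 _ hx
      · intro x hx
        rcases h3 x hx with hv | ⟨s, hs, hr⟩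
        · exact Or.inl hv
        · exact Or.inr ⟨s, List.mem_cons_of_mem _ hs, hr⟩
    · rw [if_neg hnb] at h
      cases hD : pvDfsA edges fuel nb vis with
      | none => rw [hD] at h; cases h
      | some vis1 =>
        rw [hD] at h
        obtain ⟨A1, A2, A3, A4, A5⟩ := hA nb vis vis1 hD
        obtain ⟨L1, L2, L3, L4, L5⟩ := ih vis1 out h
        refine ⟨fun x hx => L1 _ (A1 _ hx), ?_, ?_, ?_, fun hn => L5 (A5 hn)⟩
        · intro x hx
          rcases List.mem_cons.mp hx with hx | hx
          · exact hx ▸ L1 _ A2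
          · exact L2 _ hx
        · intro x hx
          rcases L3 x hx with hv | ⟨s, hs, hr⟩
          · rcases A3 x hv with hv' | hr'
            · exact Or.inl hv'
            · exact Or.inr ⟨nb, List.mem_cons_self, hr'⟩
          · exact Or.inr ⟨s, List.mem_cons_of_mem _ hs, hr⟩
        · intro x hx
          rcases L4 x hx with hv1 | hcl
          · rcases A4 x hv1 with hv | hcl'
            · exact Or.inl hv
            · exact Or.inr fun nb' hnb' => L1 _ (hcl' _ hnb')
          · exact Or.inr hcl

theorem pa_all (edges : List (String × List String)) : ∀ fuel, PA edges fuel := by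
  intro fuel
  induction fuel with
  | zero => intro node vis out h; rw [pvDfsA] at h; cases h
  | succ f ih =>
    intro node vis out h
    rw [pvDfsA] at h
    obtain ⟨L1, L2, L3, L4, L5⟩ := pl_of_pa ih _ _ _ h
    have hmem : ∀ x, x ∈ PySem.Set.add vis node ↔ x ∈ vis ∨ x = node :=
      fun x => PySem.Set.mem_add vis node x
    refine ⟨fun x hx => L1 _ ((hmem x).mpr (Or.inl hx)), L1 _ ((hmem node).mpr (Or.inr rfl)),
      ?_, ?_, fun hn => L5 (PySem.Set.nodup_add vis node hn)⟩
    · intro x hx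
      rcases L3 x hx with hv | ⟨s, hs, hr⟩
      · rcases (hmem x).mp hv with hv' | rfl
        · exact Or.inl hv'
        · exact Or.inr (PvReach.refl x)
      · exact Or.inr (PvReach.head hs hr)
    · intro x hx
      rcases L4 x hx with hv | hcl
      · rcases (hmem x).mp hv with hv' | rfl
        · exact Or.inl hv'
        · exact Or.inr fun nb hnb => L2 _ hnb
      · exact Or.inr hcl

theorem card_sdiff_add {NU vis : List String} {node : String}
    (hN : node ∈ NU) (hv : node ∉ vis) :
    (NU.toFinset \ (PySem.Set.add vis node).toFinset).card =
      (NU.toFinset \ vis.toFinset).card - 1 ∧ 1 ≤ (NU.toFinset \ vis.toFinset).card := by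
  have hsub : NU.toFinset \ (PySem.Set.add vis node).toFinset =
      (NU.toFinset \ vis.toFinset).erase node := by
    rw [set_add_of_not_mem hv]
    ext x
    simp only [Finset.mem_sdiff, Finset.mem_erase, List.mem_toFinset, List.mem_append,
      List.mem_singleton]
    tauto
  have hmem : node ∈ NU.toFinset \ vis.toFinset := by
    simp [Finset.mem_sdiff, hN, hv]
  constructor
  · rw [hsub, Finset.card_erase_of_mem hmem]
  · exact Finset.card_pos.mpr ⟨node, hmem⟩

theorem card_sdiff_mono {NU vis vis1 : List String} (h : ∀ x ∈ vis, x ∈ vis1) :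
    (NU.toFinset \ vis1.toFinset).card ≤ (NU.toFinset \ vis.toFinset).card := by
  apply Finset.card_le_card
  apply Finset.sdiff_subset_sdiff (Finset.Subset.refl _)
  intro x hx
  simp only [List.mem_toFinset] at *
  exact h _ hx

def QA (edges : List (String × List String)) (start : String) (fuel : Nat) : Prop :=
  ∀ node vis, node ∈ pvNodes edges start → node ∉ vis →
    ((pvNodes edges start).toFinset \ vis.toFinset).card < fuel →
    (pvDfsA edges fuel node vis).isSome

theorem ql_of_qa {edges : List (String × List String)} {start : String} {fuel : Nat}
    (hQ : QA edges start fuel) :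
    ∀ l vis, (∀ x ∈ l, x ∈ pvNodes edges start) →
      ((pvNodes edges start).toFinset \ vis.toFinset).card < fuel →
      (pvDfsList edges fuel l vis).isSome := by
  intro l
  induction l with
  | nil => intro vis _ _; rw [pvDfsList]; rfl
  | cons nb rest ih =>
    intro vis hl hc
    rw [pvDfsList]
    by_cases hnb : nb ∈ vis
    · rw [if_pos hnb]; exact ih vis (fun x hx => hl _ (List.mem_cons_of_mem _ hx)) hc
    · rw [if_neg hnb]
      have hs := hQ nb vis (hl _ List.mem_cons_self) hnb hc
      obtain ⟨vis1, hD⟩ := Option.isSome_iff_exists.mp hs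
      rw [hD]
      obtain ⟨A1, _, _, _, _⟩ := pa_all edges fuel nb vis vis1 hD
      exact ih vis1 (fun x hx => hl _ (List.mem_cons_of_mem _ hx))
        (lt_of_le_of_lt (card_sdiff_mono A1) hc)

theorem qa_all (edges : List (String × List String)) (start : String) :
    ∀ fuel, QA edges start fuel := by
  intro fuel
  induction fuel with
  | zero => intro node vis _ _ hc; exact absurd hc (Nat.not_lt_zero _)
  | succ f ih =>
    intro node vis hN hv hc
    rw [pvDfsA]
    apply ql_of_qa ih
    · exact fun x hx => pvAdj_subset_nodes x hx
    · obtain ⟨heq, hpos⟩ := card_sdiff_add hN hv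
      rw [heq]; omega

-- B-side loop-shape lemmas for the push fold
theorem push_subset {vis' : List String} :
    ∀ (l st : List String), ∀ x ∈ st,
      x ∈ l.foldl (fun st nb => if nb ∈ vis' then st else nb :: st) st := by
  intro l
  induction l with
  | nil => intro st x hx; exact hx
  | cons a rest ih =>
    intro st x hx
    simp only [List.foldl_cons]
    apply ih
    split
    · exact hx
    · exact List.mem_cons_of_mem _ hx

theorem push_mem {vis' : List String} :
    ∀ (l st : List String), ∀ x ∈ l.foldl (fun st nb => if nb ∈ vis' then st else nb :: st) st,
      x ∈ st ∨ x ∈ l := by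
  intro l
  induction l with
  | nil => intro st x hx; exact Or.inl hx
  | cons a rest ih =>
    intro st x hx
    simp only [List.foldl_cons] at hx
    rcases ih _ _ hx with hst | hl
    · split at hst
      · exact Or.inl hst
      · rcases List.mem_cons.mp hst with rfl | hst
        · exact Or.inr List.mem_cons_self
        · exact Or.inl hst
    · exact Or.inr (List.mem_cons_of_mem _ hl)

theorem push_mem_of {vis' : List String} :
    ∀ (l st : List String), ∀ x ∈ l, x ∉ vis' →
      x ∈ l.foldl (fun st nb => if nb ∈ vis' then st else nb :: st) st := by
  intro l
  induction l with
  | nil => intro st x hx; cases hx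
  | cons a rest ih =>
    intro st x hx hnv
    simp only [List.foldl_cons]
    rcases List.mem_cons.mp hx with rfl | hx
    · rw [if_neg hnv]
      exact push_subset _ _ _ List.mem_cons_self
    · exact ih _ _ hx hnv

theorem push_length {vis' : List String} : ∀ (l st : List String),
    (l.foldl (fun st nb => if nb ∈ vis' then st else nb :: st) st).length ≤
      st.length + l.length := by
  intro l
  induction l with
  | nil => intro st; simp
  | cons a rest ih =>
    intro st
    simp only [List.foldl_cons, List.length_cons]
    have h1 := ih (if a ∈ vis' then st else a :: st)
    have h2 : (if a ∈ vis' then st else a :: st).length ≤ st.length + 1 := by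
      split <;> simp
    omega

theorem pb_all (edges : List (String × List String)) :
    ∀ fuel stack vis out, pvLoopB edges fuel stack vis = some out →
      (∀ x ∈ vis, x ∈ out) ∧ (∀ x ∈ stack, x ∈ out) ∧
      (∀ x ∈ out, x ∈ vis ∨ ∃ s ∈ stack, PvReach edges s x) ∧
      ((∀ u ∈ vis, ∀ nb ∈ pvAdj edges u, nb ∈ vis ∨ nb ∈ stack) →
        ∀ x ∈ out, ∀ nb ∈ pvAdj edges x, nb ∈ out) ∧
      (vis.Nodup → out.Nodup) := by
  intro fuel
  induction fuel with
  | zero =>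
    intro stack vis out h
    cases stack with
    | nil =>
      rw [pvLoopB] at h
      cases h
      refine ⟨fun x hx => hx, by simp, fun x hx => Or.inl hx, ?_, id⟩
      intro hinv x hx nb hnb
      rcases hinv x hx nb hnb with hv | hv
      · exact hv
      · cases hv
    | cons node rest => rw [pvLoopB] at h; cases h
  | succ f ih =>
    intro stack vis out h
    cases stack with
    | nil =>
      rw [pvLoopB] at h
      cases h
      refine ⟨fun x hx => hx, by simp, fun x hx => Or.inl hx, ?_, id⟩
      intro hinv x hx nb hnb
      rcases hinv x hx nb hnb with hv | hv
      · exact hv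
      · cases hv
    | cons node rest =>
      rw [pvLoopB] at h
      by_cases hnode : node ∈ vis
      · rw [if_pos hnode] at h
        obtain ⟨h1, h2, h3, h4, h5⟩ := ih rest vis out h
        refine ⟨h1, ?_, ?_, ?_, h5⟩
        · intro x hx
          rcases List.mem_cons.mp hx with rfl | hx
          · exact h1 _ hnode
          · exact h2 _ hx
        · intro x hx
          rcases h3 x hx with hv | ⟨s, hs, hr⟩
          · exact Or.inl hv
          · exact Or.inr ⟨s, List.mem_cons_of_mem _ hs, hr⟩
        · intro hinv
          apply h4
          intro u hu nb hnb
          rcases hinv u hu nb hnb with hv | hv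
          · exact Or.inl hv
          · rcases List.mem_cons.mp hv with rfl | hv
            · exact Or.inl hnode
            · exact Or.inr hv
      · rw [if_neg hnode] at h
        simp only at h
        obtain ⟨h1, h2, h3, h4, h5⟩ := ih _ _ out h
        have hmem : ∀ x, x ∈ PySem.Set.add vis node ↔ x ∈ vis ∨ x = node :=
          fun x => PySem.Set.mem_add vis node x
        refine ⟨fun x hx => h1 _ ((hmem x).mpr (Or.inl hx)), ?_, ?_, ?_,
          fun hn => h5 (PySem.Set.nodup_add vis node hn)⟩
        · intro x hx
          rcases List.mem_cons.mp hx with rfl | hx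
          · exact h1 _ ((hmem x).mpr (Or.inr rfl))
          · exact h2 _ (push_subset _ _ _ hx)
        · intro x hx
          rcases h3 x hx with hv | ⟨s, hs, hr⟩
          · rcases (hmem x).mp hv with hv' | rfl
            · exact Or.inl hv'
            · exact Or.inr ⟨_, List.mem_cons_self, PvReach.refl _⟩
          · rcases push_mem _ _ _ hs with hs' | hs'
            · exact Or.inr ⟨s, List.mem_cons_of_mem _ hs', hr⟩
            · exact Or.inr ⟨_, List.mem_cons_self, PvReach.head hs' hr⟩
        · intro hinv
          apply h4
          intro u hu nb hnb
          rcases (hmem u).mp hu with hu' | rfl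
          · rcases hinv u hu' nb hnb with hv | hv
            · exact Or.inl ((hmem nb).mpr (Or.inl hv))
            · rcases List.mem_cons.mp hv with rfl | hv
              · exact Or.inl ((hmem nb).mpr (Or.inr rfl))
              · exact Or.inr (push_subset _ _ _ hv)
          · by_cases hnv : nb ∈ PySem.Set.add vis u
            · exact Or.inl hnv
            · exact Or.inr (push_mem_of _ _ _ hnb hnv)

theorem pb_suff (edges : List (String × List String)) (start : String) :
    ∀ fuel stack vis, (∀ x ∈ stack, x ∈ pvNodes edges start) →
      stack.length + (1 + (edges.map (fun p => p.2.length)).sum) *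
        ((pvNodes edges start).toFinset \ vis.toFinset).card < fuel →
      (pvLoopB edges fuel stack vis).isSome := by
  intro fuel
  induction fuel with
  | zero => intro stack vis _ hc; exact absurd hc (Nat.not_lt_zero _)
  | succ f ih =>
    intro stack vis hst hc
    cases stack with
    | nil => rw [pvLoopB]; rfl
    | cons node rest =>
      rw [pvLoopB]
      by_cases hnode : node ∈ vis
      · rw [if_pos hnode]
        apply ih rest vis (fun x hx => hst _ (List.mem_cons_of_mem _ hx))
        simp only [List.length_cons] at hc
        omega
      · rw [if_neg hnode]
        simp only
        set K := 1 + (edges.map (fun p => p.2.length)).sum with hK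
        obtain ⟨heq, hpos⟩ := card_sdiff_add (hst _ List.mem_cons_self) hnode
        apply ih
        · intro x hx
          rcases push_mem _ _ _ hx with hx' | hx'
          · exact hst _ (List.mem_cons_of_mem _ hx')
          · exact pvAdj_subset_nodes x hx'
        · rw [heq]
          have hlen := push_length (vis' := PySem.Set.add vis node) (pvAdj edges node) rest
          have hadj := pvAdj_length (edges := edges) node
          set c := ((pvNodes edges start).toFinset \ vis.toFinset).card with hc'
          have hmul : K * (c - 1) + K = K * c := by
            rw [← Nat.mul_succ]
            congr 1
            omega
          have hKle : K ≤ K * c := Nat.le_mul_of_pos_right K hpos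
          simp only [List.length_cons] at hc
          omega

-- ===== VERDICT (by name: the statement is the Claim_ definition above) =====
theorem all_reachable_spec : Claim_equal_all_reachable := by
  intro start edges total _
  unfold Spec_all_reachable
  simp only [all_reachable, all_reachable_alt]
  have hcard : ((pvNodes edges start).toFinset \ ([] : List String).toFinset).card <
      (pvNodes edges start).length + 1 := by
    simp only [List.toFinset_nil, Finset.sdiff_empty]
    exact Nat.lt_succ_of_le (List.toFinset_card_le _)
  have hA := qa_all edges start ((pvNodes edges start).length + 1) start []
    (by simp [pvNodes]) (by simp) hcard
  obtain ⟨SA, hSA⟩ := Option.isSome_iff_exists.mp hA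
  have hB := pb_suff edges start
      (2 + (1 + (edges.map (fun p => p.2.length)).sum) * (pvNodes edges start).length)
      [start] []
    (by intro x hx; rcases List.mem_cons.mp hx with rfl | hx
        · simp [pvNodes]
        · cases hx)
    (by
      simp only [List.length_cons, List.length_nil, List.toFinset_nil, Finset.sdiff_empty]
      have h1 : (pvNodes edges start).toFinset.card ≤ (pvNodes edges start).length :=
        List.toFinset_card_le _
      have h2 := Nat.mul_le_mul_left (1 + (edges.map (fun p => p.2.length)).sum) h1
      omega)
  obtain ⟨SB, hSB⟩ := Option.isSome_iff_exists.mp hB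
  obtain ⟨_, hstA, hsoundA, hclA, hndA⟩ := pa_all edges _ start [] SA hSA
  obtain ⟨_, hstB, hsoundB, hclB, hndB⟩ := pb_all edges _ [start] [] SB hSB
  have hclA' : ∀ x ∈ SA, ∀ nb ∈ pvAdj edges x, nb ∈ SA := by
    intro x hx
    rcases hclA x hx with h | h
    · cases h
    · exact h
  have hclB' : ∀ x ∈ SB, ∀ nb ∈ pvAdj edges x, nb ∈ SB := by
    apply hclB
    intro u hu
    cases hu
  have hstB' : start ∈ SB := hstB _ List.mem_cons_self
  have hiff : ∀ x, x ∈ SA ↔ x ∈ SB := by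
    intro x
    constructor
    · intro hx
      rcases hsoundA x hx with h | h
      · cases h
      · exact pvReach_mem hclB' hstB' h
    · intro hx
      rcases hsoundB x hx with h | ⟨s, hs, hr⟩
      · cases h
      · rcases List.mem_cons.mp hs with rfl | hs
        · exact pvReach_mem hclA' hstA hr
        · cases hs
  have hfin : SA.toFinset = SB.toFinset := by
    ext x
    simpa using hiff x
  have hlen : SA.length = SB.length := by
    rw [← List.toFinset_card_of_nodup (hndA List.nodup_nil),
      ← List.toFinset_card_of_nodup (hndB List.nodup_nil), hfin]
  simp only [hSA, hSB]
  rw [hlen]
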